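-- pv_equiv track=rewrite | github.com/Odyseus/OdyseusSublimePlugins | st_plugins/display_numbers.py | prepare_urls
-- ===== SOURCE A (Python) =====
-- def prepare_urls(s, base, num):
--     res = ""
--     offset = 0
--
--     bit = """<a id="bits" href='{{ "func":"{func}", "data":{{"num":{num}, "base":{base}, "offset":{offset}}}}}'>{char}</a>"""
--
--     for c in s[::-1]:
--         if c.isdigit():
--             res = bit.format(
--                 func="odyseus_dn_change_bit", num=num, base=base, offset=offset, char=c
--             ) + res
--
--             offset += 1
--         else:
--             res = c + res
--
--     return res
-- ===== SOURCE B (Python) =====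
-- def prepare_urls(s, base, num):
--     bit = """<a id="bits" href='{{ "func":"{func}", "data":{{"num":{num}, "base":{base}, "offset":{offset}}}}}'>{char}</a>"""
--
--     remaining = sum(c.isdigit() for c in s)
--     parts = []
--     for c in s:
--         if c.isdigit():
--             remaining -= 1
--             parts.append(bit.format(
--                 func="odyseus_dn_change_bit", num=num, base=base, offset=remaining, char=c
--             ))
--         else:
--             parts.append(c)
--     return "".join(parts)
-- ===== Notes on version B (the rewrite author's own statement) =====
-- stated objective: faster
-- what changed: Instead of iterating the reversed string and quadratically prepending to an accumulator string, B counts the digits once, then scans forward with a decrement-before-use counter supplying each anchor's offset, collecting fragments in a list joined once at the end.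
import Mathlib
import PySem

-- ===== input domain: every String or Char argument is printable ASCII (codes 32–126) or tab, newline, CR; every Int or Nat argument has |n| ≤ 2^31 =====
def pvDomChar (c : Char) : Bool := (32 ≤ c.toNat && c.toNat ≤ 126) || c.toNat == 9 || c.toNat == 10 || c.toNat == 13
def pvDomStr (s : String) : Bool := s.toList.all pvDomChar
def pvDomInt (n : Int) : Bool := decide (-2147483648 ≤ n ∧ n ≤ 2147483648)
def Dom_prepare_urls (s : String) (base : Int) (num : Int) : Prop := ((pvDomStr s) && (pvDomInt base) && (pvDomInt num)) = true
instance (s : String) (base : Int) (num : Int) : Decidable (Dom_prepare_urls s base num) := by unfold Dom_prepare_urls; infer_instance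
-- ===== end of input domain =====

-- B replaces A's reversed scan with quadratic string prepending by a digit pre-count plus a
-- single forward pass joining fragments once (objective: faster).

-- ===== PORT A =====

-- bit.format(func="odyseus_dn_change_bit", num=num, base=base, offset=offset, char=c)
def pvBit (base num offset : Int) (c : Char) : List Char :=
  "<a id=\"bits\" href='{ \"func\":\"odyseus_dn_change_bit\", \"data\":{\"num\":".toList
    ++ PySem.Int.toChars num ++ ", \"base\":".toList ++ PySem.Int.toChars base
    ++ ", \"offset\":".toList ++ PySem.Int.toChars offset
    ++ "}}'>".toList ++ [c] ++ "</a>".toList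

-- the 'for c in s[::-1]' loop over state (res, offset)
def pvALoop (base num : Int) : List Char → Int → List Char → List Char
  | [], _, res => res
  | c :: rest, offset, res =>
      if PySem.Chars.isdigit c then
        pvALoop base num rest (offset + 1) (pvBit base num offset c ++ res)
      else
        pvALoop base num rest offset (c :: res)

def prepare_urls (s : String) (base : Int) (num : Int) : String :=
  String.ofList (pvALoop base num s.toList.reverse 0 [])

-- ===== PORT B =====

-- remaining = sum(c.isdigit() for c in s)
def pvDigitCount (l : List Char) : Int :=
  ((l.filter PySem.Chars.isdigit).length : Int)

-- the forward loop: decrement-before-use counter, collect fragments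
def pvBLoop (base num : Int) : List Char → Int → List (List Char)
  | [], _ => []
  | c :: rest, remaining =>
      if PySem.Chars.isdigit c then
        pvBit base num (remaining - 1) c :: pvBLoop base num rest (remaining - 1)
      else
        [c] :: pvBLoop base num rest remaining

def prepare_urls_alt (s : String) (base : Int) (num : Int) : String :=
  String.ofList (PySem.Chars.join [] (pvBLoop base num s.toList (pvDigitCount s.toList)))

-- ===== PRECONDITION & SPEC =====
def Spec_prepare_urls (s : String) (base : Int) (num : Int) (out : String) : Prop := out = prepare_urls_alt s base num
instance (s : String) (base : Int) (num : Int) (out : String) : Decidable (Spec_prepare_urls s base num out) := by unfold Spec_prepare_urls; infer_instance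

-- ===== CLAIM (what is proved, stated in full; the proofs are below) =====
def Claim_equal_prepare_urls : Prop := ∀ (s : String) (base : Int) (num : Int), Dom_prepare_urls s base num → Spec_prepare_urls s base num (prepare_urls s base num)

-- ===== LEMMAS AND PROOFS =====

-- ''.join(parts) concatenates the fragments
theorem pvJoin_nil_eq_flatten (ps : List (List Char)) :
    PySem.Chars.join [] ps = ps.flatten := by
  simp [PySem.Chars.join, List.intercalate]
  induction ps with
  | nil => simp
  | cons p ps ih => cases ps <;> simp_all [List.intersperse]

theorem pvBLoop_append_singleton (base num : Int) (xs : List Char) (c : Char) :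
    ∀ r : Int, pvBLoop base num (xs ++ [c]) r
      = pvBLoop base num xs r ++ pvBLoop base num [c] (r - pvDigitCount xs) := by
  induction xs with
  | nil => intro r; simp [pvDigitCount, pvBLoop]
  | cons x xs ih =>
      intro r
      by_cases h : PySem.Chars.isdigit x
      · have harith : ∀ k : Nat, r - 1 - (k : Int) = r - ((k : Int) + 1) := by
          intro k; ring
        simp [pvBLoop, h, ih, pvDigitCount, harith]
      · simp [pvBLoop, h, ih, pvDigitCount]

theorem pvALoop_eq (base num : Int) (rl : List Char) :
    ∀ (off : Int) (res : List Char),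
      pvALoop base num rl off res
        = (pvBLoop base num rl.reverse (off + pvDigitCount rl)).flatten ++ res := by
  induction rl with
  | nil => intro off res; simp [pvALoop, pvBLoop]
  | cons c rest ih =>
      intro off res
      have hrev : pvDigitCount rest.reverse = pvDigitCount rest := by
        simp [pvDigitCount]
      by_cases h : PySem.Chars.isdigit c
      · have hc : pvDigitCount (c :: rest) = pvDigitCount rest + 1 := by
          simp [pvDigitCount, h]
        simp only [pvALoop, h, if_pos, List.reverse_cons, hc, ih]
        rw [pvBLoop_append_singleton, hrev]
        have harith : off + (pvDigitCount rest + 1) - pvDigitCount rest = off + 1 := by ring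
        have harith2 : off + 1 + pvDigitCount rest = off + (pvDigitCount rest + 1) := by ring
        rw [harith, harith2]
        simp [pvBLoop, h]
      · have hc : pvDigitCount (c :: rest) = pvDigitCount rest := by
          simp [pvDigitCount, h]
        simp only [pvALoop, h, List.reverse_cons, hc, ih]
        rw [pvBLoop_append_singleton, hrev]
        simp [pvBLoop, h]

theorem pv_core (base num : Int) (l : List Char) :
    pvALoop base num l.reverse 0 []
      = PySem.Chars.join [] (pvBLoop base num l (pvDigitCount l)) := by
  rw [pvALoop_eq]
  have hrev : pvDigitCount l.reverse = pvDigitCount l := by simp [pvDigitCount]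
  simp [pvJoin_nil_eq_flatten, hrev]

-- ===== VERDICT (by name: the statement is the Claim_ definition above) =====
theorem prepare_urls_spec : Claim_equal_prepare_urls := by
  intro s base num _
  unfold Spec_prepare_urls prepare_urls prepare_urls_alt
  rw [pv_core]
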